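-- pv_equiv track=rewrite | github.com/khalid-alsheeb/explainable-road-navigation | website/backend/src/helpers/graph_explanations.py | makeExplanationsStrings
-- ===== SOURCE A (Python) =====
-- def makeExplanationsStrings(explanations):
--
--     exps = []
--     reasons = []
--     for key, value in explanations.items():
--         if (value[0] != '' or value[1] != ''):
--             reasons.append(value[0])
--             exps.append(value[1])
--
--     return [reasons, exps]
-- ===== SOURCE B (Python) =====
-- def makeExplanationsStrings(explanations):
--     # Divide and conquer: split the value list in half, solve each half,
--     # concatenate component-wise. Correct because the filter/projection of a
--     # concatenation is the concatenation of the filters/projections.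
--     def solve(vs):
--         if not vs:
--             return [[], []]
--         if len(vs) == 1:
--             v = vs[0]
--             if v[0] != '' or v[1] != '':
--                 return [[v[0]], [v[1]]]
--             return [[], []]
--         mid = len(vs) // 2
--         left = solve(vs[:mid])
--         right = solve(vs[mid:])
--         return [left[0] + right[0], left[1] + right[1]]
--     return solve(list(explanations.values()))
-- ===== Notes on version B (the rewrite author's own statement) =====
-- stated objective: alternative
-- what changed: A filters in one left-to-right loop appending to two accumulators; B solves the problem by divide and conquer: split the value list in half, recurse on each half, and concatenate the two result components, relying on filter/projection distributing over concatenation.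
import Mathlib
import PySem

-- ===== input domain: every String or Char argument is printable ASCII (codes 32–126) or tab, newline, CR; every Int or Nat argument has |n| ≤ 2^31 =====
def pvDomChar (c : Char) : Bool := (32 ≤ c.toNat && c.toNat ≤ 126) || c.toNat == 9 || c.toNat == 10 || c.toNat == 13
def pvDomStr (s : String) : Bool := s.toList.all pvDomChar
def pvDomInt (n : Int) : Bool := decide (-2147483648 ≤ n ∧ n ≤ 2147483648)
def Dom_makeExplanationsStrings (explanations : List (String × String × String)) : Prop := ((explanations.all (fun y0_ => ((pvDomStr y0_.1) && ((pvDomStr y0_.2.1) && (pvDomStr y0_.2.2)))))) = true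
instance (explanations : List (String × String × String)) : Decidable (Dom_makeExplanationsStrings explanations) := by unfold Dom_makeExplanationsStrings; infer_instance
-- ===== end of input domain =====

-- B replaces A's single interleaved accumulator loop by a divide-and-conquer recursion on the value list (alternative algorithm, same result).


-- ===== PORT A =====
-- A: one loop appending the kept value components to two accumulator lists.
def makeExplanationsStrings (explanations : List (String × String × String)) : List (List String) :=
  let p := explanations.foldl
    (fun (acc : List String × List String) kv =>
      if kv.2.1 != "" || kv.2.2 != "" then (acc.1 ++ [kv.2.1], acc.2 ++ [kv.2.2]) else acc)
    ([], [])
  [p.1, p.2]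

-- ===== PORT B =====
-- B: divide and conquer on the value list; vs[:mid]/vs[mid:] with 0 ≤ mid ≤ len are exactly take/drop.
def pvSolveB : List (String × String) → List String × List String
  | [] => ([], [])
  | [v] => if v.1 != "" || v.2 != "" then ([v.1], [v.2]) else ([], [])
  | v₁ :: v₂ :: rest =>
    let vs := v₁ :: v₂ :: rest
    let mid := vs.length / 2
    let L := pvSolveB (vs.take mid)
    let R := pvSolveB (vs.drop mid)
    (L.1 ++ R.1, L.2 ++ R.2)
  termination_by vs => vs.length
  decreasing_by
    · simp; omega
    · simp; omega

def makeExplanationsStrings_alt (explanations : List (String × String × String)) : List (List String) :=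
  let p := pvSolveB (explanations.map (·.2))
  [p.1, p.2]

-- ===== PRECONDITION & SPEC =====
def Spec_makeExplanationsStrings (explanations : List (String × String × String)) (out : List (List String)) : Prop := out = makeExplanationsStrings_alt explanations
instance (explanations : List (String × String × String)) (out : List (List String)) : Decidable (Spec_makeExplanationsStrings explanations out) := by unfold Spec_makeExplanationsStrings; infer_instance

-- ===== CLAIM (what is proved, stated in full; the proofs are below) =====
def Claim_equal_makeExplanationsStrings : Prop := ∀ (explanations : List (String × String × String)), Dom_makeExplanationsStrings explanations → Spec_makeExplanationsStrings explanations (makeExplanationsStrings explanations)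

-- ===== LEMMAS AND PROOFS =====

lemma pvSolveB_eq (vs : List (String × String)) :
    pvSolveB vs = ((vs.filter (fun v => v.1 != "" || v.2 != "")).map Prod.fst,
                   (vs.filter (fun v => v.1 != "" || v.2 != "")).map Prod.snd) := by
  fun_induction pvSolveB vs with
  | case1 => simp
  | case2 v h => simp [h]
  | case3 v h => simp [h]
  | case4 v₁ v₂ rest vs mid L R ihT ihD =>
    have ihT' : pvSolveB (List.take ((v₁ :: v₂ :: rest).length / 2) (v₁ :: v₂ :: rest)) =
        ((List.filter (fun v => v.1 != "" || v.2 != "")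
            (List.take ((v₁ :: v₂ :: rest).length / 2) (v₁ :: v₂ :: rest))).map Prod.fst,
         (List.filter (fun v => v.1 != "" || v.2 != "")
            (List.take ((v₁ :: v₂ :: rest).length / 2) (v₁ :: v₂ :: rest))).map Prod.snd) := ihT
    have ihD' : pvSolveB (List.drop ((v₁ :: v₂ :: rest).length / 2) (v₁ :: v₂ :: rest)) =
        ((List.filter (fun v => v.1 != "" || v.2 != "")
            (List.drop ((v₁ :: v₂ :: rest).length / 2) (v₁ :: v₂ :: rest))).map Prod.fst,
         (List.filter (fun v => v.1 != "" || v.2 != "")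
            (List.drop ((v₁ :: v₂ :: rest).length / 2) (v₁ :: v₂ :: rest))).map Prod.snd) := ihD
    show ((pvSolveB (List.take ((v₁ :: v₂ :: rest).length / 2) (v₁ :: v₂ :: rest))).1 ++
          (pvSolveB (List.drop ((v₁ :: v₂ :: rest).length / 2) (v₁ :: v₂ :: rest))).1,
          (pvSolveB (List.take ((v₁ :: v₂ :: rest).length / 2) (v₁ :: v₂ :: rest))).2 ++
          (pvSolveB (List.drop ((v₁ :: v₂ :: rest).length / 2) (v₁ :: v₂ :: rest))).2) = _
    rw [ihT', ihD']
    conv_rhs => rw [← List.take_append_drop ((v₁ :: v₂ :: rest).length / 2) (v₁ :: v₂ :: rest)]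
    simp only [List.filter_append, List.map_append]

lemma pvFoldl_inv (l : List (String × String × String)) (r e : List String) :
    l.foldl
      (fun (acc : List String × List String) kv =>
        if kv.2.1 != "" || kv.2.2 != "" then (acc.1 ++ [kv.2.1], acc.2 ++ [kv.2.2]) else acc)
      (r, e)
    = (r ++ ((l.map (·.2)).filter (fun v => v.1 != "" || v.2 != "")).map Prod.fst,
       e ++ ((l.map (·.2)).filter (fun v => v.1 != "" || v.2 != "")).map Prod.snd) := by
  induction l generalizing r e with
  | nil => simp
  | cons kv t ih =>
    by_cases h : (kv.2.1 != "" || kv.2.2 != "") = true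
    · rw [List.foldl_cons, if_pos h, ih]; simp [h]
    · rw [List.foldl_cons, if_neg h, ih]; simp [h]

-- ===== VERDICT (by name: the statement is the Claim_ definition above) =====
theorem makeExplanationsStrings_spec : Claim_equal_makeExplanationsStrings := by
  intro l _
  unfold Spec_makeExplanationsStrings makeExplanationsStrings makeExplanationsStrings_alt
  rw [pvSolveB_eq]
  simp only [pvFoldl_inv, List.nil_append]
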